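-- pv_equiv track=rewrite | github.com/YuYifan2000/FDTCC | FDTCC.py | Search_event
-- ===== SOURCE A (Python) =====
-- def Search_event(PO, EVE, n,ne):
--     serial = []
--     for i in range(0, ne):
--         if (EVE[i]["event"] == PO[n]["event1"]):
--             serial.append(i)
--             break
--     for i in range(0, ne):
--         if (EVE[i]["event"] == PO[n]["event2"]):
--             serial.append(i)
--             break
--     return serial
-- ===== SOURCE B (Python) =====
-- def Search_event(PO, EVE, n, ne):
--     idx1 = None
--     idx2 = None
--     i = 0
--     while i < ne and (idx1 is None or idx2 is None):
--         e = EVE[i]["event"]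
--         if idx1 is None and e == PO[n]["event1"]:
--             idx1 = i
--         if idx2 is None and e == PO[n]["event2"]:
--             idx2 = i
--         i += 1
--     return [x for x in (idx1, idx2) if x is not None]
-- ===== Notes on version B (the rewrite author's own statement) =====
-- stated objective: alternative
-- what changed: Replaces A's two separate scans over EVE (one per event name) by a single two-slot pass that records the first index matching event1 and the first matching event2 and stops as soon as both are found.
import Mathlib
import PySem

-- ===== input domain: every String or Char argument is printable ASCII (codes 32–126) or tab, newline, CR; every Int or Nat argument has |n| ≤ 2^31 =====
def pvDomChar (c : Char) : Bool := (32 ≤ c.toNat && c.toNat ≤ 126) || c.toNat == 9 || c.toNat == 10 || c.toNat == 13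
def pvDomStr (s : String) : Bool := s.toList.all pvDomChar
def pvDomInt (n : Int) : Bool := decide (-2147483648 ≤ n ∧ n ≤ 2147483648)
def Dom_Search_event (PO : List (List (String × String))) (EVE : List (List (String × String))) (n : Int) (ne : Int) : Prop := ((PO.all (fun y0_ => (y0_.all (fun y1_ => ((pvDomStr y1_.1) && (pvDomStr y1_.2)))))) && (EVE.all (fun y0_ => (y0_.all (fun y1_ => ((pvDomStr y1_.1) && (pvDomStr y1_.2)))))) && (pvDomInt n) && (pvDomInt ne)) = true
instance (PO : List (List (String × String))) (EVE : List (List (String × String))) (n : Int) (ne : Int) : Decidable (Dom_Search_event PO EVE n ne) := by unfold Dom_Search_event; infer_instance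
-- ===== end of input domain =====

-- B replaces A's two separate scans over EVE by one two-slot pass that stops once both
-- first-match indices are found (objective: alternative, same cost).

-- EVE[i]["event"] as a total helper: the defaults never fire inside Pre_ (index in range, key present)
def pvEventAt (EVE : List (List (String × String))) (i : Int) : String :=
  PySem.Dict.getD (PySem.Dict.mk (PySem.List.pyGetD EVE i [])) "event" ""

-- ===== PORT A =====
-- 'for i in range(0, ne): if EVE[i]["event"] == t: append i; break' — one scan per target
def pvScanA (EVE : List (List (String × String))) (t : String) : Nat → Int → List Int
  | 0, _ => []
  | k+1, i => if pvEventAt EVE i == t then [i] else pvScanA EVE t k (i+1)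

def Search_event (PO : List (List (String × String))) (EVE : List (List (String × String))) (n : Int) (ne : Int) : List Int :=
  let po := PySem.Dict.mk (PySem.List.pyGetD PO n [])
  pvScanA EVE (PySem.Dict.getD po "event1" "") ne.toNat 0
    ++ pvScanA EVE (PySem.Dict.getD po "event2" "") ne.toNat 0

-- ===== PORT B =====
-- 'while i < ne and (idx1 is None or idx2 is None): …' — one pass, two slots
def pvLoopB (EVE : List (List (String × String))) (e1 e2 : String) :
    Nat → Int → Option Int → Option Int → Option Int × Option Int
  | 0, _, a, b => (a, b)
  | k+1, i, a, b =>
    if a.isNone || b.isNone then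
      let e := pvEventAt EVE i
      pvLoopB EVE e1 e2 k (i+1)
        (if a.isNone && e == e1 then some i else a)
        (if b.isNone && e == e2 then some i else b)
    else (a, b)

def Search_event_alt (PO : List (List (String × String))) (EVE : List (List (String × String))) (n : Int) (ne : Int) : List Int :=
  let po := PySem.Dict.mk (PySem.List.pyGetD PO n [])
  let r := pvLoopB EVE (PySem.Dict.getD po "event1" "") (PySem.Dict.getD po "event2" "") ne.toNat 0 none none
  r.1.toList ++ r.2.toList

-- ===== PRECONDITION & SPEC =====
-- Pre_ excludes inputs where Python A raises: n out of index range, ne > len(EVE), or a missing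
-- "event1"/"event2"/"event" key (KeyError); requiring "event" on ALL first ne entries is slightly
-- narrower than A's exact returning set, since an early break can skip a later missing key.
def Pre_Search_event (PO : List (List (String × String))) (EVE : List (List (String × String))) (n : Int) (ne : Int) : Prop :=
  0 < ne →
    (PySem.Raise.InRange PO.length n ∧
     ((PySem.Dict.mk (PySem.List.pyGetD PO n [])).get? "event1").isSome ∧
     ((PySem.Dict.mk (PySem.List.pyGetD PO n [])).get? "event2").isSome ∧
     ne ≤ PySem.List.len EVE ∧
     ∀ d ∈ EVE.take ne.toNat, ((PySem.Dict.mk d).get? "event").isSome)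
instance (PO : List (List (String × String))) (EVE : List (List (String × String))) (n : Int) (ne : Int) : Decidable (Pre_Search_event PO EVE n ne) := by unfold Pre_Search_event; infer_instance

def pvWitness_Search_event : (List (List (String × String))) × (List (List (String × String))) × Int × Int :=
  ([[("event1", "a"), ("event2", "b")]], [[("event", "b")], [("event", "a")]], 0, 2)

def Spec_Search_event (PO : List (List (String × String))) (EVE : List (List (String × String))) (n : Int) (ne : Int) (out : List Int) : Prop := out = Search_event_alt PO EVE n ne
instance (PO : List (List (String × String))) (EVE : List (List (String × String))) (n : Int) (ne : Int) (out : List Int) : Decidable (Spec_Search_event PO EVE n ne out) := by unfold Spec_Search_event; infer_instance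

-- ===== CLAIM (what is proved, stated in full; the proofs are below) =====
def Claim_equal_Search_event : Prop := ∀ (PO : List (List (String × String))) (EVE : List (List (String × String))) (n : Int) (ne : Int), Dom_Search_event PO EVE n ne → Pre_Search_event PO EVE n ne → Spec_Search_event PO EVE n ne (Search_event PO EVE n ne)

-- ===== LEMMAS AND PROOFS =====

-- first index i' ∈ [i, i+k) with pvEventAt EVE i' = t — the common characterisation of both loops
def pvFind (EVE : List (List (String × String))) (t : String) : Nat → Int → Option Int
  | 0, _ => none
  | k+1, i => if pvEventAt EVE i == t then some i else pvFind EVE t k (i+1)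

theorem pvScanA_eq_find (EVE : List (List (String × String))) (t : String) :
    ∀ (k : Nat) (i : Int), pvScanA EVE t k i = (pvFind EVE t k i).toList := by
  intro k
  induction k with
  | zero => intro i; rfl
  | succ k ih =>
    intro i
    simp only [pvScanA, pvFind]
    split <;> simp [ih]

theorem pvLoopB_eq_find (EVE : List (List (String × String))) (e1 e2 : String) :
    ∀ (k : Nat) (i : Int) (a b : Option Int),
      pvLoopB EVE e1 e2 k i a b = (a.or (pvFind EVE e1 k i), b.or (pvFind EVE e2 k i)) := by
  intro k
  induction k with
  | zero => intro i a b; simp [pvLoopB, pvFind]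
  | succ k ih =>
    intro i a b
    by_cases h1 : pvEventAt EVE i = e1 <;> by_cases h2 : pvEventAt EVE i = e2 <;>
      cases a <;> cases b <;>
      simp [pvLoopB, pvFind, ih, h1, h2] <;> split <;> simp

-- ===== VERDICT (by name: the statement is the Claim_ definition above) =====
theorem Search_event_spec : Claim_equal_Search_event := by
  unfold Claim_equal_Search_event
  intro PO EVE n ne _ _
  unfold Spec_Search_event Search_event Search_event_alt
  simp [pvScanA_eq_find, pvLoopB_eq_find, Option.or]
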